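-- pv_equiv track=rewrite | github.com/tuggypetu/cp1404practicals | prac4/memberwise_addition.py | add_memberwise
-- ===== SOURCE A (Python) =====
-- def add_memberwise(list1, list2):
--     """Return added list"""
--     added_list = []
--     difference = abs(len(list1) - len(list2))
--     if len(list1) > len(list2):
--         for i in range(len(list2)):
--             sum_index = list1[i] + list2[i]
--             added_list.append(int(sum_index))
--         for j in range(difference):
--             sum_index = list1[len(list2) + j]
--             added_list.append(int(sum_index))
--     else:
--         for i in range(len(list1)):
--             sum_index = list1[i] + list2[i]
--             added_list.append(int(sum_index))
--         for j in range(difference):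
--             sum_index = list2[len(list1) + j]
--             added_list.append(int(sum_index))
--     return added_list
-- ===== SOURCE B (Python) =====
-- def add_memberwise(list1, list2):
--     """Return added list"""
--     n = max(len(list1), len(list2))
--     a = list1 + [0] * (n - len(list1))
--     b = list2 + [0] * (n - len(list2))
--     return [int(x + y) for x, y in zip(a, b)]
-- ===== Notes on version B (the rewrite author's own statement) =====
-- stated objective: simpler
-- what changed: Replaces A's length branch with two index loops per side by zero-padding the shorter list once and doing a single zipped pass.
import Mathlib
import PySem

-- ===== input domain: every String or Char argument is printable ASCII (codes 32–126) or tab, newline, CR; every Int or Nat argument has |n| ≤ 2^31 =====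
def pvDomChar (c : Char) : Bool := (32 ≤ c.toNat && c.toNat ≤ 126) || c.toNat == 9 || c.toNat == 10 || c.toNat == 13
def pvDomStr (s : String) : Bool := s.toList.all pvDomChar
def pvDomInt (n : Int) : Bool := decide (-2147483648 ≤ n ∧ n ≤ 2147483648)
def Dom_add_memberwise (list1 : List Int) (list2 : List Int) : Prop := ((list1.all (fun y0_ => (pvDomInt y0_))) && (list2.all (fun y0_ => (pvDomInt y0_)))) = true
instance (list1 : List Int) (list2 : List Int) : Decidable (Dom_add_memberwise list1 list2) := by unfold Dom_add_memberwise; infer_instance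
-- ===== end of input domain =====

-- B replaces A's length branch and two loops per side with one zero-padded zipped pass (objective: simpler).
-- ===== PORT A =====
-- All indices taken inside the loops are in range, so list.getD i 0 returns exactly list[i];
-- int() on an int is the identity, so append(int(v)) is ported as appending v.
def add_memberwise (list1 : List Int) (list2 : List Int) : List Int :=
  let added_list : List Int := []
  let difference : Nat := ((list1.length : Int) - (list2.length : Int)).natAbs
  if list1.length > list2.length then
    let added_list := (List.range list2.length).foldl
      (fun acc i => acc ++ [list1.getD i 0 + list2.getD i 0]) added_list
    (List.range difference).foldl
      (fun acc j => acc ++ [list1.getD (list2.length + j) 0]) added_list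
  else
    let added_list := (List.range list1.length).foldl
      (fun acc i => acc ++ [list1.getD i 0 + list2.getD i 0]) added_list
    (List.range difference).foldl
      (fun acc j => acc ++ [list2.getD (list1.length + j) 0]) added_list

-- ===== PORT B =====
def add_memberwise_alt (list1 : List Int) (list2 : List Int) : List Int :=
  let n := max list1.length list2.length
  let a := list1 ++ List.replicate (n - list1.length) 0
  let b := list2 ++ List.replicate (n - list2.length) 0
  (a.zip b).map (fun p => p.1 + p.2)

-- ===== PRECONDITION & SPEC =====
def Spec_add_memberwise (list1 : List Int) (list2 : List Int) (out : List Int) : Prop := out = add_memberwise_alt list1 list2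
instance (list1 : List Int) (list2 : List Int) (out : List Int) : Decidable (Spec_add_memberwise list1 list2 out) := by unfold Spec_add_memberwise; infer_instance

-- ===== CLAIM (what is proved, stated in full; the proofs are below) =====
def Claim_equal_add_memberwise : Prop := ∀ (list1 : List Int) (list2 : List Int), Dom_add_memberwise list1 list2 → Spec_add_memberwise list1 list2 (add_memberwise list1 list2)

-- ===== LEMMAS AND PROOFS =====

-- ===== VERDICT (by name: the statement is the Claim_ definition above) =====
-- canonical recursive memberwise sum with leftover tail
def mwAdd : List Int → List Int → List Int
  | [], ys => ys
  | xs, [] => xs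
  | x :: xs, y :: ys => (x + y) :: mwAdd xs ys

theorem foldl_app_map {α β : Type} (g : α → β) :
    ∀ (l : List α) (init : List β),
      l.foldl (fun acc i => acc ++ [g i]) init = init ++ l.map g := by
  intro l
  induction l with
  | nil => simp
  | cons a t ih => intro init; simp [List.foldl, ih]

theorem zip_replicate_right (ys : List Int) :
    (List.map (fun p => p.1 + p.2) (ys.zip (List.replicate ys.length (0 : Int)))) = ys := by
  induction ys with
  | nil => rfl
  | cons y t ih => simp [List.replicate, ih]

theorem zip_replicate_left (ys : List Int) :
    (List.map (fun p => p.1 + p.2) ((List.replicate ys.length (0 : Int)).zip ys)) = ys := by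
  induction ys with
  | nil => rfl
  | cons y t ih => simp [List.replicate, ih]

theorem alt_eq_mwAdd : ∀ (l1 l2 : List Int), add_memberwise_alt l1 l2 = mwAdd l1 l2 := by
  intro l1
  induction l1 with
  | nil =>
    intro l2
    cases l2 with
    | nil => rfl
    | cons y t =>
      simp only [add_memberwise_alt, mwAdd, List.length_nil, List.nil_append]
      simpa using zip_replicate_left (y :: t)
  | cons x xs ih =>
    intro l2
    cases l2 with
    | nil =>
      simp only [add_memberwise_alt, mwAdd, List.length_nil]
      simpa using zip_replicate_right (x :: xs)
    | cons y ys =>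
      have h := ih ys
      simp only [add_memberwise_alt] at h ⊢
      simp only [List.length_cons, Nat.succ_max_succ, Nat.succ_sub_succ, List.cons_append,
        List.zip_cons_cons, List.map_cons, mwAdd]
      exact congrArg _ h

theorem range_map_getD (xs : List Int) :
    (List.range xs.length).map (fun j => xs.getD j 0) = xs := by
  induction xs with
  | nil => rfl
  | cons x t ih =>
    rw [List.length_cons, List.range_succ_eq_map, List.map_cons, List.map_map]
    simp only [List.getD_cons_zero]
    exact congrArg _ ih

theorem range_map_zip (l1 l2 : List Int) (h : l1.length ≤ l2.length) :
    (List.range l1.length).map (fun i => l1.getD i 0 + l2.getD i 0) = l1.zipWith (· + ·) l2 := by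
  induction l1 generalizing l2 with
  | nil => rfl
  | cons x xs ih =>
    cases l2 with
    | nil => simp at h
    | cons y ys =>
      rw [List.length_cons, List.range_succ_eq_map, List.map_cons, List.map_map]
      simp only [List.getD_cons_zero, List.zipWith_cons_cons]
      exact congrArg _ (ih ys (by simpa using h))

theorem range_map_tail (xs : List Int) (k : Nat) :
    (List.range (xs.length - k)).map (fun j => xs.getD (k + j) 0) = xs.drop k := by
  have h1 : ∀ j, xs.getD (k + j) 0 = (xs.drop k).getD j 0 := by
    intro j
    simp [List.getD, List.getElem?_drop]
  calc (List.range (xs.length - k)).map (fun j => xs.getD (k + j) 0)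
      = (List.range (xs.drop k).length).map (fun j => (xs.drop k).getD j 0) := by
        simp only [List.length_drop]
        exact List.map_congr_left (fun j _ => h1 j)
    _ = xs.drop k := range_map_getD _

theorem mwAdd_eq_le (l1 l2 : List Int) (h : l1.length ≤ l2.length) :
    mwAdd l1 l2 = l1.zipWith (· + ·) l2 ++ l2.drop l1.length := by
  induction l1 generalizing l2 with
  | nil => cases l2 <;> rfl
  | cons x xs ih =>
    cases l2 with
    | nil => simp at h
    | cons y ys =>
      simp only [mwAdd, List.zipWith_cons_cons, List.length_cons, List.drop_succ_cons,
        List.cons_append]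
      exact congrArg _ (ih ys (by simpa using h))

theorem mwAdd_eq_gt (l1 l2 : List Int) (h : l2.length ≤ l1.length) :
    mwAdd l1 l2 = l2.zipWith (· + ·) l1 ++ l1.drop l2.length := by
  induction l1 generalizing l2 with
  | nil =>
    cases l2 with
    | nil => rfl
    | cons y ys => simp at h
  | cons x xs ih =>
    cases l2 with
    | nil => rfl
    | cons y ys =>
      simp only [mwAdd, List.zipWith_cons_cons, List.length_cons, List.drop_succ_cons,
        List.cons_append, Int.add_comm x y]
      exact congrArg _ (ih ys (by simpa using h))

-- ===== VERDICT (by name: the statement is the Claim_ definition above) =====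
theorem add_memberwise_spec : Claim_equal_add_memberwise := by
  intro l1 l2 _
  unfold Spec_add_memberwise
  rw [alt_eq_mwAdd]
  unfold add_memberwise
  by_cases h : l1.length > l2.length
  · simp only [h, if_true]
    rw [foldl_app_map, foldl_app_map, List.nil_append]
    have hd : ((l1.length : Int) - (l2.length : Int)).natAbs = l1.length - l2.length := by omega
    have hc : (List.range l2.length).map (fun i => l1.getD i 0 + l2.getD i 0)
        = (List.range l2.length).map (fun i => l2.getD i 0 + l1.getD i 0) :=
      List.map_congr_left (fun i _ => Int.add_comm _ _)
    rw [hd, range_map_tail l1 l2.length, hc, range_map_zip l2 l1 (Nat.le_of_lt h),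
        mwAdd_eq_gt l1 l2 (Nat.le_of_lt h)]
  · simp only [h, if_false]
    replace h : l1.length ≤ l2.length := Nat.le_of_not_lt h
    rw [foldl_app_map, foldl_app_map, List.nil_append]
    have hd : ((l1.length : Int) - (l2.length : Int)).natAbs = l2.length - l1.length := by omega
    rw [hd, range_map_tail l2 l1.length, mwAdd_eq_le l1 l2 h]
    congr 1
    exact range_map_zip l1 l2 h
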